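-- pv_equiv track=rewrite | github.com/mallickboy/Python_Search_Engine | serverClient/knapsack.py | break_into_sum_of
-- ===== SOURCE A (Python) =====
-- def break_into_sum_of(target,arr):
--     def backtrack(start, path, target):
--         if target == 0:
--             result.append(path)
--             return
--         if target < 0 or start >= len(arr):
--             return
--         for i in range(start, len(arr)):
--             if i > start and arr[i] == arr[i - 1]:
--                 continue  # Skip duplicate elements
--             backtrack(i + 1, path + [arr[i]], target - arr[i])
--
--     result = []
--     arr.sort()  # Sort the array to handle duplicate elements
--     backtrack(0, [], target)
--     return result[0]
-- ===== SOURCE B (Python) =====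
-- def break_into_sum_of(target, arr):
--     arr.sort()
--     n = len(arr)
--     memo = {}
--
--     def solvable(start, t):
--         # True iff A's pruned DFS from (start, t) reaches t == 0
--         if t == 0:
--             return True
--         if t < 0 or start >= n:
--             return False
--         key = (start, t)
--         if key not in memo:
--             memo[key] = any(solvable(i + 1, t - arr[i]) for i in range(start, n))
--         return memo[key]
--
--     if not solvable(0, target):
--         raise ValueError("no subset of arr sums to target")
--     res = []
--     start = 0
--     rem = target
--     while rem != 0:
--         i = start
--         while not solvable(i + 1, rem - arr[i]):
--             i += 1
--         res.append(arr[i])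
--         rem -= arr[i]
--         start = i + 1
--     return res
-- ===== Notes on version B (the rewrite author's own statement) =====
-- stated objective: faster
-- what changed: A runs a duplicate-pruned backtracking that collects every solution into a list and returns its first element; B instead computes a memoized boolean feasibility predicate solvable(start,t) and then greedily reconstructs the answer, at each step taking the first index whose remainder stays feasible.
import Mathlib
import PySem

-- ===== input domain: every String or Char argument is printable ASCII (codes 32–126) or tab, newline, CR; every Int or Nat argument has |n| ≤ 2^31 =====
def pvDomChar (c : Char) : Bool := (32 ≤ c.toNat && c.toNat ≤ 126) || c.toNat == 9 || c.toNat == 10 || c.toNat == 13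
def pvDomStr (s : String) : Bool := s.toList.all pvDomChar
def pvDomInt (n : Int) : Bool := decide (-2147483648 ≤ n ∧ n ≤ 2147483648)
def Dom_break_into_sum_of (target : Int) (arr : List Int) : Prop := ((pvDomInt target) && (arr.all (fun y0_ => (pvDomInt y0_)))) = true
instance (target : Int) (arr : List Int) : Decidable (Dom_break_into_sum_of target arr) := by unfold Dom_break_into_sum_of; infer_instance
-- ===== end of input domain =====

-- B replaces A's collect-all-solutions backtracking (build the full result list, then return
-- result[0]) by a memoized boolean feasibility predicate plus greedy first-feasible-index
-- reconstruction (objective: faster, measured).  Both Pythons sort arr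
-- in place (same mutation); the equivalence proved here is about the return value.


-- ===== PORT A =====
-- backtrack(start, path, target) over the sorted array; the suffix arr[start:] is the list
-- argument, and `prev` carries arr[i-1] so that `i > start and arr[i] == arr[i-1]` is
-- exactly `prev = some x`.  btA returns the (ordered) list of solutions `result` collects.
mutual
def btA : List Int → List Int → Int → List (List Int)
  | xs, path, t =>
    if t = 0 then [path]
    else if t < 0 ∨ xs = [] then []
    else loopA none xs path t
  termination_by xs _ _ => (xs.length, 1)
def loopA : Option Int → List Int → List Int → Int → List (List Int)
  | _, [], _, _ => []
  | prev, x :: rest, path, t =>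
    (if prev = some x then [] else btA rest (path ++ [x]) (t - x)) ++ loopA (some x) rest path t
  termination_by _ xs _ _ => (xs.length, 0)
end

def break_into_sum_of (target : Int) (arr : List Int) : List Int :=
  -- result[0]: Python raises IndexError when result is empty; that case is outside
  -- Pre_break_into_sum_of and the port returns [] there
  ((btA (PySem.List.sorted arr (fun x => x) false) [] target).head?).getD []

-- ===== PORT B =====
-- solvable(start, t) of Source B (the memo cache only saves recomputation; the value computed is
-- this recursion); the suffix arr[start:] is the list argument, and Python's short-circuit
-- `any(... for i in range(start, n))` is the `||`-fold solvLoop over that suffix.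
mutual
def solvable : List Int → Int → Bool
  | xs, t =>
    if t = 0 then true
    else if t < 0 ∨ xs = [] then false
    else solvLoop xs t
  termination_by xs _ => (xs.length, 1)
def solvLoop : List Int → Int → Bool
  | [], _ => false
  | x :: rest, t => solvable rest (t - x) || solvLoop rest t
  termination_by xs _ => (xs.length, 0)
end

-- the inner `while not solvable(i + 1, rem - arr[i]): i += 1` scan: first element x of the
-- suffix whose remainder rem - x stays solvable, together with the suffix after it
def scanIdx : List Int → Int → Option (Int × List Int)
  | [], _ => none
  | x :: rest, t => if solvable rest (t - x) then some (x, rest) else scanIdx rest t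

-- termination lemma for rebuild (the while loop consumes a strict suffix each iteration)
theorem scanIdx_length : ∀ (xs : List Int) (t x : Int) (rest : List Int),
    scanIdx xs t = some (x, rest) → rest.length < xs.length := by
  intro xs
  induction xs with
  | nil => intro t x rest h; simp [scanIdx] at h
  | cons y ys ih =>
    intro t x rest h
    simp only [scanIdx] at h
    split_ifs at h with hs
    · cases h; simp
    · exact Nat.lt_trans (ih t x rest h) (by simp)

-- the outer `while rem != 0` loop of Source B building res
def rebuild (xs : List Int) (t : Int) : List Int :=
  if t = 0 then []
  else
    match h : scanIdx xs t with
    | some (x, rest) => x :: rebuild rest (t - x)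
    | none => []   -- unreachable when solvable xs t (Python would raise IndexError)
  termination_by xs.length
  decreasing_by exact scanIdx_length xs t x rest h

def break_into_sum_of_alt (target : Int) (arr : List Int) : List Int :=
  let s := PySem.List.sorted arr (fun x => x) false
  -- Python raises ValueError when not solvable; outside Pre_break_into_sum_of (port returns [])
  if solvable s target then rebuild s target else []

-- ===== PRECONDITION & SPEC =====
-- Pre_ excludes exactly the inputs on which Python A raises IndexError (result is empty):
-- target negative, or no subset of arr sums to target.
def Pre_break_into_sum_of (target : Int) (arr : List Int) : Prop :=
  0 ≤ target ∧ ∃ s ∈ arr.sublists, s.sum = target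
instance (target : Int) (arr : List Int) : Decidable (Pre_break_into_sum_of target arr) := by
  unfold Pre_break_into_sum_of; infer_instance
def pvWitness_break_into_sum_of : Int × List Int := (3, [1, 2])

def Spec_break_into_sum_of (target : Int) (arr : List Int) (out : List Int) : Prop := out = break_into_sum_of_alt target arr
instance (target : Int) (arr : List Int) (out : List Int) : Decidable (Spec_break_into_sum_of target arr out) := by unfold Spec_break_into_sum_of; infer_instance

-- ===== CLAIM (what is proved, stated in full; the proofs are below) =====
def Claim_equal_break_into_sum_of : Prop := ∀ (target : Int) (arr : List Int), Dom_break_into_sum_of target arr → Pre_break_into_sum_of target arr → Spec_break_into_sum_of target arr (break_into_sum_of target arr)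

-- ===== LEMMAS AND PROOFS =====

-- feasibility is monotone under widening the suffix (contrapositive form)
theorem solvable_cons_false (x : Int) (r : List Int) (s : Int)
    (h : solvable (x :: r) s = false) : solvable r s = false := by
  by_cases h0 : s = 0
  · rw [solvable, if_pos h0] at h; cases h
  · rw [solvable, if_neg h0]
    by_cases h2 : s < 0 ∨ r = []
    · rw [if_pos h2]
    · rw [if_neg h2]
      have h1 : ¬ s < 0 := fun hl => h2 (Or.inl hl)
      rw [solvable, if_neg h0, if_neg (by simp [h1])] at h
      rw [solvLoop] at h
      simp only [Bool.or_eq_false_iff] at h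
      exact h.2

theorem scanIdx_none_iff (xs : List Int) (t : Int) :
    scanIdx xs t = none ↔ solvLoop xs t = false := by
  induction xs with
  | nil => simp [scanIdx, solvLoop]
  | cons x rest ih =>
    simp only [scanIdx, solvLoop]
    split_ifs with hs
    · simp [hs]
    · simp [hs, ih]

-- the key invariant: the head of A's collected solution list at any node is B's greedy
-- reconstruction there (with the accumulated path prepended), guarded by feasibility;
-- the loop version carries the fact that a skipped head branch is infeasible.
theorem head_btA_eq_rebuild : ∀ (n : Nat) (xs : List Int), xs.length ≤ n →
    (∀ (path : List Int) (t : Int),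
      (btA xs path t).head? = (if solvable xs t then some (path ++ rebuild xs t) else none)) ∧
    (∀ (prev : Option Int) (path : List Int) (t : Int), t ≠ 0 → ¬ t < 0 →
      (∀ (v : Int) (rest' : List Int), prev = some v → xs = v :: rest' →
        solvable rest' (t - v) = false) →
      (loopA prev xs path t).head? = (match scanIdx xs t with
        | some (x, rest) => some (path ++ x :: rebuild rest (t - x))
        | none => none)) := by
  intro n
  induction n with
  | zero =>
    intro xs hxs
    have hnil : xs = [] := List.length_eq_zero_iff.mp (Nat.le_zero.mp hxs)
    subst hnil
    refine ⟨?_, ?_⟩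
    · intro path t
      by_cases h0 : t = 0
      · have hs : solvable [] t = true := by rw [solvable, if_pos h0]
        have hr : rebuild [] t = [] := by rw [rebuild, if_pos h0]
        rw [btA, if_pos h0, hs, hr]
        simp
      · have hs : solvable [] t = false := by rw [solvable, if_neg h0, if_pos (Or.inr rfl)]
        rw [btA, if_neg h0, if_pos (Or.inr rfl), hs]
        simp
    · intro prev path t ht0 htn _
      simp [loopA, scanIdx]
  | succ n ih =>
    intro xs hxs
    have hLoop : ∀ (prev : Option Int) (path : List Int) (t : Int), t ≠ 0 → ¬ t < 0 →
        (∀ (v : Int) (rest' : List Int), prev = some v → xs = v :: rest' →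
          solvable rest' (t - v) = false) →
        (loopA prev xs path t).head? = (match scanIdx xs t with
          | some (x, rest) => some (path ++ x :: rebuild rest (t - x))
          | none => none) := by
      intro prev path t ht0 htn hskip
      match xs with
      | [] => simp [loopA, scanIdx]
      | x :: rest =>
        have hrest : rest.length ≤ n := by simp at hxs; omega
        have ihA := (ih rest hrest).1
        have ihL := (ih rest hrest).2
        rw [loopA, scanIdx]
        by_cases hp : prev = some x
        · have hinf : solvable rest (t - x) = false := hskip x rest hp rfl
          rw [if_pos hp, if_neg (by simp [hinf])]
          simp only [List.nil_append]
          refine ihL (some x) path t ht0 htn ?_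
          intro v rest' hv hr
          cases hv
          cases hr
          exact solvable_cons_false x rest' (t - x) hinf
        · rw [if_neg hp, List.head?_append, ihA (path ++ [x]) (t - x)]
          by_cases hs : solvable rest (t - x) = true
          · rw [if_pos hs, if_pos hs]
            simp
          · have hs' : solvable rest (t - x) = false := by
              cases h : solvable rest (t - x); rfl; exact absurd h hs
            rw [if_neg hs, if_neg (by simp [hs'])]
            simp only [Option.none_or]
            refine ihL (some x) path t ht0 htn ?_
            intro v rest' hv hr
            cases hv
            cases hr
            exact solvable_cons_false x rest' (t - x) hs'
    refine ⟨?_, hLoop⟩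
    intro path t
    by_cases h0 : t = 0
    · have hs : solvable xs t = true := by rw [solvable, if_pos h0]
      have hr : rebuild xs t = [] := by rw [rebuild, if_pos h0]
      rw [btA, if_pos h0, hs, hr]
      simp
    · by_cases h1 : t < 0 ∨ xs = []
      · have hs : solvable xs t = false := by rw [solvable, if_neg h0, if_pos h1]
        rw [btA, if_neg h0, if_pos h1, hs]
        simp
      · have hs : solvable xs t = solvLoop xs t := by rw [solvable, if_neg h0, if_neg h1]
        rw [btA, if_neg h0, if_neg h1,
          hLoop none path t h0 (fun hl => h1 (Or.inl hl)) (by intro v rest' hv _; cases hv), hs]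
        cases h : scanIdx xs t with
        | none =>
          rw [(scanIdx_none_iff xs t).mp h]
          rfl
        | some p =>
          obtain ⟨x, rest⟩ := p
          have hl : solvLoop xs t = true := by
            cases hv : solvLoop xs t
            · rw [(scanIdx_none_iff xs t).mpr hv] at h; cases h
            · rfl
          have hrb : rebuild xs t = x :: rebuild rest (t - x) := by
            rw [rebuild, if_neg h0, h]
          rw [hl, hrb]
          rfl

theorem break_into_sum_of_eq (target : Int) (arr : List Int) :
    break_into_sum_of target arr = break_into_sum_of_alt target arr := by
  unfold break_into_sum_of break_into_sum_of_alt
  set s := PySem.List.sorted arr (fun x => x) false with hs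
  rw [(head_btA_eq_rebuild s.length s le_rfl).1 [] target]
  by_cases h : solvable s target = true
  · rw [if_pos h, if_pos h]; simp
  · rw [if_neg h, if_neg h]; rfl

-- ===== VERDICT (by name: the statement is the Claim_ definition above) =====
theorem break_into_sum_of_spec : Claim_equal_break_into_sum_of := by
  intro target arr _ _
  unfold Spec_break_into_sum_of
  exact break_into_sum_of_eq target arr
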